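-- pv_equiv track=rewrite | github.com/academia-szycho/clases | ejercicio_3_3.py | mayor_producto
-- ===== SOURCE A (Python) =====
-- def mayor_producto(a,b,c,d):
--     producto = [a, b, c, d]
--     maximo = None
--     for i, numero in enumerate(producto):
--         actual = i + 1
--         while actual < len(producto):
--             resultado = numero * producto[actual]
--             if maximo is None or resultado > maximo:
--                 maximo = resultado
--             actual = actual + 1
--
--     return maximo
-- ===== SOURCE B (Python) =====
-- def mayor_producto(a, b, c, d):
--     s = sorted([a, b, c, d])
--     return max(s[0] * s[1], s[2] * s[3])
-- ===== Notes on version B (the rewrite author's own statement) =====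
-- stated objective: simpler
-- what changed: Replaces the nested enumeration of all 6 pairs with a sort of the four numbers followed by a two-candidate closed form: max of (two smallest)*(each other) vs (two largest)*(each other).
import Mathlib
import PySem

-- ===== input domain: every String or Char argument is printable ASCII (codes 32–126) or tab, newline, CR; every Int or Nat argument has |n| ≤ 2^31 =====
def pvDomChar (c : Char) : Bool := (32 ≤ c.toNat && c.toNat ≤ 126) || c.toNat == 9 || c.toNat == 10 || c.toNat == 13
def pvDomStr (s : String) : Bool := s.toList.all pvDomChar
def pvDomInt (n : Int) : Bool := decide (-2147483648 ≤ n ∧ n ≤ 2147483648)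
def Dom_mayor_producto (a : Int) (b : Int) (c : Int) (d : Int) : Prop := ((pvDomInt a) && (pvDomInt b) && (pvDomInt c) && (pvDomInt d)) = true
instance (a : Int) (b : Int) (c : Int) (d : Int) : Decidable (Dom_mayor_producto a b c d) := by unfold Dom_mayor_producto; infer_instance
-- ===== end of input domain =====

-- B replaces A's nested enumeration of all 6 pairwise products with a sort of the
-- four numbers and the closed form max(s0*s1, s2*s3) (objective: simpler).

-- ===== PORT A =====
-- the inner `while actual < len(producto)` loop of A, literally
def pvWhileA (producto : List Int) (numero : Int) (actual : Int) (maximo : Option Int) : Option Int :=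
  if actual < (producto.length : Int) then
    let resultado := numero * producto.getD actual.toNat 0   -- index always in range here
    let maximo' : Option Int :=
      match maximo with
      | none => some resultado
      | some m => if resultado > m then some resultado else some m
    pvWhileA producto numero (actual + 1) maximo'
  else maximo
termination_by ((producto.length : Int) - actual).toNat
decreasing_by omega

def mayor_producto (a : Int) (b : Int) (c : Int) (d : Int) : Int :=
  let producto := [a, b, c, d]
  let maximo : Option Int :=
    (PySem.List.enumerate producto).foldl
      (fun maximo (p : Int × Int) => pvWhileA producto p.2 (p.1 + 1) maximo) none
  maximo.getD 0   -- the loop always sets maximo (4 ≥ 2 elements); none is unreachable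

-- ===== PORT B =====
def mayor_producto_alt (a : Int) (b : Int) (c : Int) (d : Int) : Int :=
  let s := PySem.List.sorted [a, b, c, d] (fun x => x) false
  max (s.getD 0 0 * s.getD 1 0) (s.getD 2 0 * s.getD 3 0)   -- indices 0..3 always in range

-- ===== PRECONDITION & SPEC =====
def Spec_mayor_producto (a : Int) (b : Int) (c : Int) (d : Int) (out : Int) : Prop := out = mayor_producto_alt a b c d
instance (a : Int) (b : Int) (c : Int) (d : Int) (out : Int) : Decidable (Spec_mayor_producto a b c d out) := by unfold Spec_mayor_producto; infer_instance

-- ===== CLAIM (what is proved, stated in full; the proofs are below) =====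
def Claim_equal_mayor_producto : Prop := ∀ (a : Int) (b : Int) (c : Int) (d : Int), Dom_mayor_producto a b c d → Spec_mayor_producto a b c d (mayor_producto a b c d)

-- ===== LEMMAS AND PROOFS =====

-- the list of all pairwise products of distinct positions
def pairProds : List Int → List Int
  | [] => []
  | x :: xs => xs.map (x * ·) ++ pairProds xs

lemma perm_middle_comm (A B C : List Int) : (A ++ (B ++ C)).Perm (B ++ (A ++ C)) := by
  rw [← List.append_assoc, ← List.append_assoc]
  exact List.perm_append_comm.append_right C

lemma pairProds_perm {l₁ l₂ : List Int} (h : l₁.Perm l₂) :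
    (pairProds l₁).Perm (pairProds l₂) := by
  induction h with
  | nil => exact List.Perm.refl _
  | cons x h ih => exact ((h.map _).append ih)
  | swap x y l =>
      simp only [pairProds, List.map_cons, List.cons_append]
      rw [mul_comm y x]
      exact List.Perm.cons _ (perm_middle_comm _ _ _)
  | trans h₁ h₂ ih₁ ih₂ => exact ih₁.trans ih₂

lemma foldl_max_perm {l₁ l₂ : List Int} (h : l₁.Perm l₂) :
    ∀ i : Int, l₁.foldl max i = l₂.foldl max i := by
  induction h with
  | nil => intro i; rfl
  | cons x h ih => intro i; simp only [List.foldl_cons]; exact ih _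
  | swap x y l => intro i; simp only [List.foldl_cons, max_right_comm]
  | trans h₁ h₂ ih₁ ih₂ => intro i; exact (ih₁ i).trans (ih₂ i)

lemma init_le_foldl_max (l : List Int) (i : Int) : i ≤ l.foldl max i := by
  induction l generalizing i with
  | nil => exact le_refl _
  | cons x xs ih => exact le_trans (le_max_left i x) (ih _)

lemma mem_le_foldl_max {x : Int} {l : List Int} (hx : x ∈ l) (i : Int) :
    x ≤ l.foldl max i := by
  induction l generalizing i with
  | nil => cases hx
  | cons y ys ih =>
      rcases List.mem_cons.mp hx with h | h
      · subst h; exact le_trans (le_max_right i x) (init_le_foldl_max _ _)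
      · exact ih h _
lemma foldl_max_le {l : List Int} {i M : Int} (hi : i ≤ M) (hl : ∀ x ∈ l, x ≤ M) :
    l.foldl max i ≤ M := by
  induction l generalizing i with
  | nil => exact hi
  | cons y ys ih =>
      exact ih (max_le hi (hl y (List.mem_cons_self))) (fun x hx => hl x (List.mem_cons_of_mem _ hx))

lemma foldl_max_init_mem {l : List Int} {i j : Int} (hi : i ∈ l) (hj : j ∈ l) :
    l.foldl max i = l.foldl max j := by
  refine le_antisymm ?_ ?_ <;>
    exact foldl_max_le (mem_le_foldl_max ‹_› _) (fun x hx => mem_le_foldl_max hx _)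

-- the body of A's conditional update, as a step function
def pvStep (m : Option Int) (r : Int) : Option Int :=
  match m with
  | none => some r
  | some v => if r > v then some r else some v

lemma pvStep_none (r : Int) : pvStep none r = some r := rfl

lemma pvStep_some (v x : Int) : pvStep (some v) x = some (max v x) := by
  simp only [pvStep]
  split_ifs with h
  · rw [max_eq_right (le_of_lt h)]
  · rw [max_eq_left (not_lt.mp h)]

-- the while loop folds pvStep over the products of numero with the suffix
lemma pvWhileA_eval (l : List Int) (n : Int) :
    ∀ (k j : Nat) (m : Option Int), l.length ≤ j + k →
      pvWhileA l n (j : Int) m = ((l.drop j).map (fun x => n * x)).foldl pvStep m := by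
  intro k
  induction k with
  | zero =>
      intro j m hk
      rw [pvWhileA, if_neg (by exact_mod_cast not_lt.mpr (by omega)),
        List.drop_eq_nil_of_le (by omega)]
      rfl
  | succ k ih =>
      intro j m hk
      rw [pvWhileA]
      by_cases h : (j : Int) < (l.length : Int)
      · have hj : j < l.length := by exact_mod_cast h
        rw [if_pos h, List.drop_eq_getElem_cons hj]
        simp only [List.map_cons, List.foldl_cons]
        have hc : ((j : Int) + 1) = ((j + 1 : Nat) : Int) := by push_cast; ring
        rw [hc, ih (j + 1) _ (by omega)]
        congr 1
        simp [pvStep, List.getD_eq_getElem?_getD, List.getElem?_eq_getElem hj]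
      · have hj : l.length ≤ j := by exact_mod_cast not_lt.mp h
        rw [if_neg h, List.drop_eq_nil_of_le hj]
        rfl

-- A evaluates to the foldl-max of pairProds
lemma A_eval (a b c d : Int) :
    mayor_producto a b c d = (pairProds [a, b, c, d]).foldl max (a * b) := by
  unfold mayor_producto
  simp only [PySem.List.enumerate_cons, PySem.List.enumerate_nil, List.foldl_cons, List.foldl_nil]
  norm_num
  rw [show (1:Int) = ((1:Nat) : Int) from by norm_num,
      show (2:Int) = ((2:Nat) : Int) from by norm_num,
      show (3:Int) = ((3:Nat) : Int) from by norm_num,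
      show (4:Int) = ((4:Nat) : Int) from by norm_num]
  rw [pvWhileA_eval _ _ 4 1 _ (by simp), pvWhileA_eval _ _ 4 2 _ (by simp),
      pvWhileA_eval _ _ 4 3 _ (by simp), pvWhileA_eval _ _ 4 4 _ (by simp)]
  simp [pairProds, pvStep_none, pvStep_some, max_self, max_assoc]

-- with p ≤ q ≤ r ≤ t, the max of the six products collapses to max (p*q) (r*t)
lemma sorted_collapse (p q r t : Int) (h1 : p ≤ q) (h2 : q ≤ r) (h3 : r ≤ t) :
    (pairProds [p, q, r, t]).foldl max (p * q) = max (p * q) (r * t) := by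
  have hpr : p * r ≤ max (p * q) (r * t) := by
    rcases le_total p 0 with hp | hp
    · exact le_trans (mul_le_mul_of_nonpos_left h2 hp) (le_max_left _ _)
    · have : r * p ≤ r * t := mul_le_mul_of_nonneg_left (le_trans h1 (le_trans h2 h3)) (le_trans hp (le_trans h1 h2))
      calc p * r = r * p := mul_comm _ _
        _ ≤ r * t := this
        _ ≤ _ := le_max_right _ _
  have hpt : p * t ≤ max (p * q) (r * t) := by
    rcases le_total p 0 with hp | hp
    · exact le_trans (mul_le_mul_of_nonpos_left (le_trans h2 h3) hp) (le_max_left _ _)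
    · have ht : (0:Int) ≤ t := le_trans hp (le_trans h1 (le_trans h2 h3))
      exact le_trans (mul_le_mul_of_nonneg_right (le_trans h1 h2) ht) (le_max_right _ _)
  have hqr : q * r ≤ max (p * q) (r * t) := by
    rcases le_total q 0 with hq | hq
    · have : q * r ≤ q * q := mul_le_mul_of_nonpos_left h2 hq
      have h2' : q * q ≤ p * q := mul_le_mul_of_nonpos_right h1 hq
      exact le_trans (le_trans this h2') (le_max_left _ _)
    · have hr : (0:Int) ≤ r := le_trans hq h2
      calc q * r = r * q := mul_comm _ _
        _ ≤ r * t := mul_le_mul_of_nonneg_left (le_trans h2 h3) hr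
        _ ≤ _ := le_max_right _ _
  have hqt : q * t ≤ max (p * q) (r * t) := by
    rcases le_total q 0 with hq | hq
    · have : q * t ≤ q * q := mul_le_mul_of_nonpos_left (le_trans h2 h3) hq
      have h2' : q * q ≤ p * q := mul_le_mul_of_nonpos_right h1 hq
      exact le_trans (le_trans this h2') (le_max_left _ _)
    · have ht : (0:Int) ≤ t := le_trans hq (le_trans h2 h3)
      exact le_trans (mul_le_mul_of_nonneg_right h2 ht) (le_max_right _ _)
  simp only [pairProds, List.map, List.append_nil, List.nil_append, List.cons_append]
  refine le_antisymm (foldl_max_le (le_max_left _ _) ?_) (max_le (init_le_foldl_max _ _) (mem_le_foldl_max (by simp) _))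
  intro x hx
  simp only [List.mem_cons, List.not_mem_nil, or_false] at hx
  rcases hx with h|h|h|h|h|h <;> subst h
  · exact le_max_left _ _
  · exact hpr
  · exact hpt
  · exact hqr
  · exact hqt
  · exact le_max_right _ _
lemma B_eval (a b c d : Int) :
    mayor_producto_alt a b c d = (pairProds [a, b, c, d]).foldl max (a * b) := by
  unfold mayor_producto_alt
  have hperm := PySem.List.sorted_perm [a,b,c,d] (fun x => x) false
  have hpw := PySem.List.sorted_pairwise [a,b,c,d] (fun x => x)
  have hlen : (PySem.List.sorted [a,b,c,d] (fun x => x) false).length = 4 := by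
    rw [hperm.length_eq]; rfl
  set s := PySem.List.sorted [a,b,c,d] (fun x => x) false with hs
  match s, hperm, hpw, hlen with
  | [p, q, r, t], hperm, hpw, _ =>
    simp only [List.pairwise_cons, List.mem_cons, List.not_mem_nil, or_false,
      List.Pairwise.nil, forall_eq_or_imp, forall_eq, and_true] at hpw
    obtain ⟨⟨h1, _, _⟩, ⟨h2, _⟩, h3, _⟩ := hpw
    show max (p * q) (r * t) = _
    rw [← sorted_collapse p q r t h1 h2 h3]
    have hpp := pairProds_perm hperm
    have hmem1 : p * q ∈ pairProds [a, b, c, d] := hpp.mem_iff.mp (by simp [pairProds])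
    have hmem2 : a * b ∈ pairProds [a, b, c, d] := by simp [pairProds]
    rw [foldl_max_perm hpp (p * q)]
    exact (foldl_max_init_mem hmem1 hmem2)

-- ===== VERDICT (by name: the statement is the Claim_ definition above) =====
theorem mayor_producto_spec : Claim_equal_mayor_producto := by
  intro a b c d _
  show mayor_producto a b c d = mayor_producto_alt a b c d
  rw [A_eval, B_eval]
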